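-- pv_equiv track=rewrite | github.com/egyadmin/wahbi-aiii | pricing_system/modules/pricing_strategies/pricing_strategies.py | _calculate_base_costs
-- ===== SOURCE A (Python) =====
-- def _calculate_base_costs(project_data):
--     """حساب التكاليف الأساسية"""
--     if not project_data:
--         return {}
--
--     materials_cost = sum(item.get("materials_cost", 0) for item in project_data.get("items", []))
--     equipment_cost = sum(item.get("equipment_cost", 0) for item in project_data.get("items", []))
--     labor_cost = sum(item.get("labor_cost", 0) for item in project_data.get("items", []))
--     subcontractors_cost = sum(item.get("subcontractors_cost", 0) for item in project_data.get("items", []))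
--
--     return {
--         "materials": materials_cost,
--         "equipment": equipment_cost,
--         "labor": labor_cost,
--         "subcontractors": subcontractors_cost,
--         "total": materials_cost + equipment_cost + labor_cost + subcontractors_cost
--     }
-- ===== SOURCE B (Python) =====
-- def _calculate_base_costs(project_data):
--     """حساب التكاليف الأساسية"""
--     if not project_data:
--         return {}
--
--     # Group-by aggregation: iterate each item's own entries and bucket them by
--     # key into a totals table, instead of doing a .get() lookup per field per item.
--     totals = {"materials_cost": 0, "equipment_cost": 0,
--               "labor_cost": 0, "subcontractors_cost": 0}
--     for item in project_data.get("items", []):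
--         for key, value in item.items():
--             if key in totals:
--                 totals[key] += value
--
--     return {
--         "materials": totals["materials_cost"],
--         "equipment": totals["equipment_cost"],
--         "labor": totals["labor_cost"],
--         "subcontractors": totals["subcontractors_cost"],
--         "total": sum(totals.values()),
--     }
-- ===== Notes on version B (the rewrite author's own statement) =====
-- stated objective: alternative
-- what changed: Replaces A's four separate per-field .get() scans over the items list with a single group-by aggregation: one pass over each item's own key/value entries bucketed into a totals dict, the grand total read off as sum(totals.values()).
import Mathlib
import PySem

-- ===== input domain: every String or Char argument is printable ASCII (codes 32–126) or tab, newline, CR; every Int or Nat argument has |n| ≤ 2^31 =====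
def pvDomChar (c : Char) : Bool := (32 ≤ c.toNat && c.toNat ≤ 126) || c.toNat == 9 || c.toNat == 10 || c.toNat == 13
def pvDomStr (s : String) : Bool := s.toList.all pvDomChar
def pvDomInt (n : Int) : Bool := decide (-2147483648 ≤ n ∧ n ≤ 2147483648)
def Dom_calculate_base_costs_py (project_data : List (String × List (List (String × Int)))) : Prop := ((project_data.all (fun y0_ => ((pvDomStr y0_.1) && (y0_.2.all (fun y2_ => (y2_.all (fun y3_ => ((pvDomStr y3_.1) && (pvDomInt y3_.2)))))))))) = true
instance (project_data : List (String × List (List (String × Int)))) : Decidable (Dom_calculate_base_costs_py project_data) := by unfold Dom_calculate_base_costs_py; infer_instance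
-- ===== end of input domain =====

-- B replaces A's four per-field .get() scans by a group-by aggregation over each item's own entries (alternative decomposition).

-- ===== PORT A =====
-- A: four independent sums, each re-reading project_data.get("items", []) and looking up one field per item.
def calculate_base_costs_py (project_data : List (String × List (List (String × Int)))) : List (String × Int) :=
  if project_data = [] then []
  else
    let materials_cost := (((PySem.Dict.mk project_data).getD "items" []).map (fun item => (PySem.Dict.mk item).getD "materials_cost" 0)).sum
    let equipment_cost := (((PySem.Dict.mk project_data).getD "items" []).map (fun item => (PySem.Dict.mk item).getD "equipment_cost" 0)).sum
    let labor_cost := (((PySem.Dict.mk project_data).getD "items" []).map (fun item => (PySem.Dict.mk item).getD "labor_cost" 0)).sum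
    let subcontractors_cost := (((PySem.Dict.mk project_data).getD "items" []).map (fun item => (PySem.Dict.mk item).getD "subcontractors_cost" 0)).sum
    [("materials", materials_cost), ("equipment", equipment_cost), ("labor", labor_cost),
     ("subcontractors", subcontractors_cost),
     ("total", materials_cost + equipment_cost + labor_cost + subcontractors_cost)]

-- ===== PORT B =====
-- B: a totals dict keyed by field name; one pass over each item's own (key, value) entries buckets them by key;
-- the grand total is sum(totals.values()).
def calculate_base_costs_py_alt (project_data : List (String × List (List (String × Int)))) : List (String × Int) :=
  if project_data = [] then []
  else
    let totals0 : PySem.Dict String Int :=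
      PySem.Dict.ofList [("materials_cost", 0), ("equipment_cost", 0), ("labor_cost", 0), ("subcontractors_cost", 0)]
    let totals := ((PySem.Dict.mk project_data).getD "items" []).foldl
      (fun t item => item.foldl
        (fun (t : PySem.Dict String Int) (p : String × Int) =>
          if t.contains p.1 then t.modify p.1 0 (· + p.2) else t) t) totals0
    [("materials", totals.getD "materials_cost" 0),
     ("equipment", totals.getD "equipment_cost" 0),
     ("labor", totals.getD "labor_cost" 0),
     ("subcontractors", totals.getD "subcontractors_cost" 0),
     ("total", totals.values.sum)]

-- ===== PRECONDITION & SPEC =====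
-- Pre_ excludes association lists in which some item has a duplicate key: such lists do not encode any
-- Python dict (an item arrives as a dict, so its keys are unique), so no behaviour is specified there.
def Pre_calculate_base_costs_py (project_data : List (String × List (List (String × Int)))) : Prop :=
  ∀ p ∈ project_data, ∀ item ∈ p.2, (item.map Prod.fst).Nodup
instance (project_data : List (String × List (List (String × Int)))) : Decidable (Pre_calculate_base_costs_py project_data) := by unfold Pre_calculate_base_costs_py; infer_instance

def pvWitness_calculate_base_costs_py : (List (String × List (List (String × Int)))) :=
  [("items", [[("materials_cost", 3), ("labor_cost", 2)], [("equipment_cost", -1)]])]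

def Spec_calculate_base_costs_py (project_data : List (String × List (List (String × Int)))) (out : List (String × Int)) : Prop := out = calculate_base_costs_py_alt project_data
instance (project_data : List (String × List (List (String × Int)))) (out : List (String × Int)) : Decidable (Spec_calculate_base_costs_py project_data out) := by unfold Spec_calculate_base_costs_py; infer_instance

-- ===== CLAIM (what is proved, stated in full; the proofs are below) =====
def Claim_equal_calculate_base_costs_py : Prop := ∀ (project_data : List (String × List (List (String × Int)))), Dom_calculate_base_costs_py project_data → Pre_calculate_base_costs_py project_data → Spec_calculate_base_costs_py project_data (calculate_base_costs_py project_data)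

-- ===== LEMMAS AND PROOFS =====

-- B's inner entry loop preserves the key set of the totals dict.
theorem inner_keys (pairs : List (String × Int)) (t : PySem.Dict String Int) :
    (pairs.foldl (fun (t : PySem.Dict String Int) (p : String × Int) =>
        if t.contains p.1 then t.modify p.1 0 (· + p.2) else t) t).keys = t.keys := by
  induction pairs generalizing t with
  | nil => rfl
  | cons p ps ih =>
      simp only [List.foldl_cons]
      rw [ih]
      by_cases hc : t.contains p.1
      · rw [if_pos hc, PySem.Dict.keys_modify, PySem.Dict.keys_insert_of_contains _ _ hc]
      · rw [if_neg hc]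

-- B's inner entry loop adds, at any key f present in totals, the sum of the entries carrying key f.
theorem inner_getD (pairs : List (String × Int)) (t : PySem.Dict String Int) (f : String)
    (hf : f ∈ t.keys) :
    (pairs.foldl (fun (t : PySem.Dict String Int) (p : String × Int) =>
        if t.contains p.1 then t.modify p.1 0 (· + p.2) else t) t).getD f 0
      = t.getD f 0 + ((pairs.filter (fun p => p.1 == f)).map (·.2)).sum := by
  induction pairs generalizing t with
  | nil => simp
  | cons p ps ih =>
      simp only [List.foldl_cons, List.filter_cons]
      by_cases hc : t.contains p.1
      · have hk : (t.modify p.1 0 (· + p.2)).keys = t.keys := by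
          rw [PySem.Dict.keys_modify, PySem.Dict.keys_insert_of_contains _ _ hc]
        rw [if_pos hc, ih _ (by rw [hk]; exact hf), PySem.Dict.getD_modify]
        by_cases hpf : p.1 = f
        · simp only [hpf, beq_self_eq_true, if_true, List.map_cons, List.sum_cons]
          ring
        · simp [hpf, Ne.symm hpf]
      · have hpf : p.1 ≠ f := by
          intro e
          rw [PySem.Dict.contains_eq_decide_mem_keys] at hc
          simp [e, hf] at hc
        rw [if_neg hc, ih _ hf]
        simp [hpf]

-- For an item with unique keys, the sum of its entries at key f is its dict lookup item.get(f, 0).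
theorem filter_sum_eq_getD (pairs : List (String × Int)) (f : String)
    (h : (pairs.map Prod.fst).Nodup) :
    ((pairs.filter (fun p => p.1 == f)).map (·.2)).sum = (PySem.Dict.mk pairs).getD f 0 := by
  induction pairs with
  | nil =>
      simp [show PySem.Dict.mk ([] : List (String × Int)) = PySem.Dict.empty from rfl,
            PySem.Dict.getD_empty]
  | cons p ps ih =>
      simp only [List.map_cons, List.nodup_cons] at h
      simp only [List.filter_cons]
      by_cases hpf : p.1 = f
      · have : ps.filter (fun q => q.1 == f) = [] := by
          rw [List.filter_eq_nil_iff]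
          intro q hq
          have : q.1 ∈ ps.map Prod.fst := List.mem_map_of_mem hq
          simp only [beq_iff_eq]
          intro hqf
          exact h.1 (by rw [hpf, ← hqf]; exact this)
        rw [PySem.Dict.getD_eq_get?_getD, PySem.Dict.get?_mk_cons]
        simp [hpf, this]
      · rw [PySem.Dict.getD_eq_get?_getD, PySem.Dict.get?_mk_cons]
        have hne : (p.1 == f) = false := by simp [hpf]
        rw [hne]
        simp only [Bool.false_eq_true, if_false]
        rw [← PySem.Dict.getD_eq_get?_getD]
        exact ih h.2

-- B's outer loop preserves the key set.
theorem outer_keys (items : List (List (String × Int))) (t : PySem.Dict String Int) :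
    (items.foldl (fun t item => item.foldl
        (fun (t : PySem.Dict String Int) (p : String × Int) =>
          if t.contains p.1 then t.modify p.1 0 (· + p.2) else t) t) t).keys = t.keys := by
  induction items generalizing t with
  | nil => rfl
  | cons it rest ih => simp only [List.foldl_cons]; rw [ih, inner_keys]

-- B's whole aggregation, read at a key f present in totals, is A's per-field sum.
theorem outer_getD (items : List (List (String × Int))) (t : PySem.Dict String Int) (f : String)
    (hf : f ∈ t.keys) (hnd : ∀ item ∈ items, (item.map Prod.fst).Nodup) :
    (items.foldl (fun t item => item.foldl
        (fun (t : PySem.Dict String Int) (p : String × Int) =>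
          if t.contains p.1 then t.modify p.1 0 (· + p.2) else t) t) t).getD f 0
      = t.getD f 0 + (items.map (fun item => (PySem.Dict.mk item).getD f 0)).sum := by
  induction items generalizing t with
  | nil => simp
  | cons it rest ih =>
      simp only [List.foldl_cons, List.map_cons, List.sum_cons]
      have hf' : f ∈ (it.foldl (fun (t : PySem.Dict String Int) (p : String × Int) =>
          if t.contains p.1 then t.modify p.1 0 (· + p.2) else t) t).keys := by
        rw [inner_keys]; exact hf
      rw [ih _ hf' (fun i hi => hnd i (List.mem_cons_of_mem _ hi)),
          inner_getD _ _ _ hf,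
          filter_sum_eq_getD _ _ (hnd it (List.mem_cons_self ..))]
      ring

-- Items retrieved by project_data.get("items", []) are items of some entry of project_data.
theorem mem_getD_items (pd : List (String × List (List (String × Int)))) (item : List (String × Int))
    (h : item ∈ (PySem.Dict.mk pd).getD "items" []) : ∃ p ∈ pd, item ∈ p.2 := by
  induction pd with
  | nil =>
      simp [show PySem.Dict.mk ([] : List (String × List (List (String × Int)))) = PySem.Dict.empty from rfl,
            PySem.Dict.getD_empty] at h
  | cons q rest ih =>
      rw [PySem.Dict.getD_eq_get?_getD, PySem.Dict.get?_mk_cons] at h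
      by_cases hq : q.1 = "items"
      · simp only [hq, beq_self_eq_true, if_true, Option.getD_some] at h
        exact ⟨q, List.mem_cons_self .., h⟩
      · simp only [show (q.1 == "items") = false by simpa using hq, Bool.false_eq_true, if_false] at h
        rw [← PySem.Dict.getD_eq_get?_getD] at h
        obtain ⟨p, hp, hi⟩ := ih h
        exact ⟨p, List.mem_cons_of_mem _ hp, hi⟩

-- ===== VERDICT (by name: the statement is the Claim_ definition above) =====
theorem calculate_base_costs_py_spec : Claim_equal_calculate_base_costs_py := by
  intro pd _ hpre
  unfold Spec_calculate_base_costs_py calculate_base_costs_py calculate_base_costs_py_alt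
  by_cases h : pd = []
  · simp [h]
  · rw [if_neg h, if_neg h]
    dsimp only
    set t0 : PySem.Dict String Int :=
      PySem.Dict.ofList [("materials_cost", 0), ("equipment_cost", 0), ("labor_cost", 0), ("subcontractors_cost", 0)] with ht0
    have hkeys0 : t0.keys = ["materials_cost", "equipment_cost", "labor_cost", "subcontractors_cost"] := by
      rw [ht0]; decide
    have hnd : ∀ item ∈ (PySem.Dict.mk pd).getD "items" [], (item.map Prod.fst).Nodup := by
      intro item hi
      obtain ⟨p, hp, hip⟩ := mem_getD_items pd item hi
      exact hpre p hp item hip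
    set T := (((PySem.Dict.mk pd).getD "items" []).foldl (fun t item => item.foldl
          (fun (t : PySem.Dict String Int) (p : String × Int) =>
            if t.contains p.1 then t.modify p.1 0 (· + p.2) else t) t) t0) with hT
    have hget : ∀ f ∈ t0.keys,
        T.getD f 0 = (((PySem.Dict.mk pd).getD "items" []).map (fun item => (PySem.Dict.mk item).getD f 0)).sum := by
      intro f hf
      rw [hT, outer_getD _ _ _ hf hnd]
      have h0 : t0.getD f 0 = 0 := by
        rw [hkeys0] at hf
        rw [ht0]
        fin_cases hf <;> decide
      rw [h0, zero_add]
    have hkeysT : T.keys = ["materials_cost", "equipment_cost", "labor_cost", "subcontractors_cost"] := by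
      rw [hT, outer_keys, hkeys0]
    have hvals : T.values.sum =
        T.getD "materials_cost" 0 + T.getD "equipment_cost" 0 + T.getD "labor_cost" 0 + T.getD "subcontractors_cost" 0 := by
      rw [PySem.Dict.values_eq_map_keys T (by rw [hkeysT]; decide) 0, hkeysT]
      simp [add_assoc]
    rw [hvals,
        hget "materials_cost" (by rw [hkeys0]; decide),
        hget "equipment_cost" (by rw [hkeys0]; decide),
        hget "labor_cost" (by rw [hkeys0]; decide),
        hget "subcontractors_cost" (by rw [hkeys0]; decide)]
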